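-- pv_equiv track=rewrite | github.com/NaomiLita/bioinformatics | Project_L5/L5/ex2.py | find_best_overlap
-- ===== SOURCE A (Python) =====
-- def find_best_overlap(current_seq, fragments, used_indices):
--     best_overlap = 0
--     best_fragment = None
--     best_index = None
--
--     for i, frag in enumerate(fragments):
--         if i in used_indices:
--             continue
--         # Check decreasing overlap lengths
--         for j in range(100, 10, -1):
--             if current_seq.endswith(frag[:j]):
--                 if j > best_overlap:
--                     best_overlap = j
--                     best_fragment = frag
--                     best_index = i
--     return best_fragment, best_index, best_overlap
-- ===== SOURCE B (Python) =====
-- def _prefix_function(t):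
--     # classic KMP failure function of t
--     n = len(t)
--     pi = [0] * n
--     for i in range(1, n):
--         k = pi[i - 1]
--         while k > 0 and t[i] != t[k]:
--             k = pi[k - 1]
--         if t[i] == t[k]:
--             k += 1
--         pi[i] = k
--     return pi
--
--
-- def _overlap(current_seq, frag):
--     # longest prefix of frag[:100] that is a suffix of current_seq, in one
--     # KMP prefix-function pass over pattern + sentinel + text
--     p = frag[:100]
--     # only the last 100 chars of current_seq can take part in an overlap <= 100
--     t = p + "\x00" + current_seq[-100:]
--     ov = _prefix_function(t)[-1]
--     if ov == len(p):
--         return 100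
--     return ov if ov > 10 else 0
--
--
-- def find_best_overlap(current_seq, fragments, used_indices):
--     used = set(used_indices)
--     best_fragment, best_index, best_overlap = None, None, 0
--     for i, frag in enumerate(fragments):
--         if i in used:
--             continue
--         j = _overlap(current_seq, frag)
--         if j > best_overlap:
--             best_fragment, best_index, best_overlap = frag, i, j
--     return best_fragment, best_index, best_overlap
-- ===== Notes on version B (the rewrite author's own statement) =====
-- stated objective: alternative
-- what changed: A tests all 90 candidate overlap lengths per fragment with endswith; B computes the single maximal overlap per fragment in one KMP pass, running the prefix (failure) function over frag[:100] + '\x00' sentinel + current_seq[-100:] and mapping the resulting border length to A's 100/j/0 value; used_indices becomes a set and the best triple is kept in output order.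
import Mathlib
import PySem

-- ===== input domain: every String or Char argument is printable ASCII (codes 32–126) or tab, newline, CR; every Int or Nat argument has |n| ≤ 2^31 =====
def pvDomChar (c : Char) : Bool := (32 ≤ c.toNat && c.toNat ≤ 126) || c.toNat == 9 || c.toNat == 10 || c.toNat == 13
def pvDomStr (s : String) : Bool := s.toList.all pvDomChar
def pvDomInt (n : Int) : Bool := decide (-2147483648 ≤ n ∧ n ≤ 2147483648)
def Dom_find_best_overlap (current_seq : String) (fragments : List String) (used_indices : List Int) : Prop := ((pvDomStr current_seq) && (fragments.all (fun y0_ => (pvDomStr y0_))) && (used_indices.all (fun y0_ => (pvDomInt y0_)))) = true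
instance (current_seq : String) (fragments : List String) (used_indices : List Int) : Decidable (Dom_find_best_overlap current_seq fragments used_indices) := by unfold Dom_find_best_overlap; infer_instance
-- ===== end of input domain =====

-- B replaces A's per-fragment scan over all 90 candidate overlap lengths by a single KMP
-- prefix-function pass over frag[:100] + '\x00' sentinel + current_seq, reading the one
-- maximal overlap off the failure function; objective: alternative (different algorithm).

-- ===== PORT A =====
def find_best_overlap (current_seq : String) (fragments : List String) (used_indices : List Int) : Option String × Option Int × Int :=
  let st :=
    (PySem.List.enumerate fragments 0).foldl
      (fun (st : Int × Option String × Option Int) p =>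
        if p.1 ∈ used_indices then st
        else
          (PySem.List.pyRange 100 10 (-1)).foldl
            (fun (st : Int × Option String × Option Int) j =>
              if PySem.Str.endswith current_seq (PySem.Str.slice p.2 none (some j)) then
                if j > st.1 then (j, some p.2, some p.1) else st
              else st)
            st)
      (0, none, none)
  (st.2.1, st.2.2, st.1)

-- ===== PORT B =====
-- the `while k > 0 and t[i] != t[k]` loop of _prefix_function; fuel makes it structural
-- (fuel = entering k suffices: k strictly decreases each iteration); t[·] is `getD`,
-- exact because every index used is in range whenever the Python loop runs
def pvKmpFall (t : List Char) (pi : List Nat) (c : Char) : Nat → Nat → Nat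
  | k, 0 => k
  | k, fuel + 1 =>
    if 0 < k ∧ ¬ c = t.getD k (Char.ofNat 0) then pvKmpFall t pi c (pi.getD (k - 1) 0) fuel
    else k

-- body of one iteration of the `for i in range(1, n)` loop: the next value pi[i]
def pvKmpStepVal (t : List Char) (pi : List Nat) : Nat :=
  let i := pi.length
  let c := t.getD i (Char.ofNat 0)
  let k0 := pi.getD (i - 1) 0
  let k1 := pvKmpFall t pi c k0 k0
  if c = t.getD k1 (Char.ofNat 0) then k1 + 1 else k1

-- the `for i in range(1, n)` loop of _prefix_function; pi grows by one entry per step,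
-- i = pi.length is the current index, m the number of remaining iterations
def pvKmpGo (t : List Char) : Nat → List Nat → List Nat
  | 0, pi => pi
  | m + 1, pi => pvKmpGo t m (pi ++ [pvKmpStepVal t pi])

def pvPrefixFun (t : List Char) : List Nat :=
  if t.length = 0 then [] else pvKmpGo t (t.length - 1) [0]

def pvOverlapKMP (S frag : String) : Int :=
  let p := (PySem.Str.slice frag none (some 100)).toList
  let t := p ++ (Char.ofNat 0) :: (PySem.Str.slice S (some (-100)) none).toList
  let ov := (pvPrefixFun t).getLast?.getD 0
  if ov = p.length then 100 else if ov > 10 then (ov : Int) else 0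

def find_best_overlap_alt (current_seq : String) (fragments : List String) (used_indices : List Int) : Option String × Option Int × Int :=
  let used := PySem.Set.ofList used_indices
  (PySem.List.enumerate fragments 0).foldl
    (fun (st : Option String × Option Int × Int) p =>
      if p.1 ∈ used then st
      else
        let j := pvOverlapKMP current_seq p.2
        if j > st.2.2 then (some p.2, some p.1, j) else st)
    (none, none, 0)

-- ===== PRECONDITION & SPEC =====
def Spec_find_best_overlap (current_seq : String) (fragments : List String) (used_indices : List Int) (out : Option String × Option Int × Int) : Prop := out = find_best_overlap_alt current_seq fragments used_indices
instance (current_seq : String) (fragments : List String) (used_indices : List Int) (out : Option String × Option Int × Int) : Decidable (Spec_find_best_overlap current_seq fragments used_indices out) := by unfold Spec_find_best_overlap; infer_instance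

-- ===== CLAIM (what is proved, stated in full; the proofs are below) =====
def Claim_equal_find_best_overlap : Prop := ∀ (current_seq : String) (fragments : List String) (used_indices : List Int), Dom_find_best_overlap current_seq fragments used_indices → Spec_find_best_overlap current_seq fragments used_indices (find_best_overlap current_seq fragments used_indices)

-- ===== LEMMAS AND PROOFS =====

-- ---- A-side: the descending inner scan computes the largest matching length ----

-- largest j in [11, 10+n] with cond j, else 0
def pvMx (cond : Int → Bool) : Nat → Int
  | 0 => 0
  | n + 1 => if cond (11 + (n : Int)) then 11 + (n : Int) else pvMx cond n

lemma pvMx_succ (cond : Int → Bool) (n : Nat) :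
    pvMx cond (n + 1) = if cond (11 + (n : Int)) then 11 + (n : Int) else pvMx cond n := rfl

lemma pvMx_nonneg (cond : Int → Bool) (n : Nat) : 0 ≤ pvMx cond n := by
  induction n with
  | zero => simp [pvMx]
  | succ n ih => rw [pvMx_succ]; split_ifs with h; · omega
                 · exact ih

lemma pvMx_le (cond : Int → Bool) (n : Nat) : pvMx cond n ≤ 10 + n := by
  induction n with
  | zero => simp [pvMx]
  | succ n ih => rw [pvMx_succ]; split_ifs with h <;> push_cast <;> omega

lemma pvMx_trunc (cond : Int → Bool) (m : Nat) :
    ∀ n, m ≤ n → (∀ k : Nat, m ≤ k → k < n → cond (11 + (k : Int)) = false) →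
    pvMx cond n = pvMx cond m := by
  intro n
  induction n with
  | zero => intro h _; have hm : m = 0 := by omega
            rw [hm]
  | succ n ih =>
    intro hmn hfalse
    rcases Nat.eq_or_lt_of_le hmn with h | h
    · rw [h]
    · rw [pvMx_succ, hfalse n (by omega) (by omega),
        if_neg (show ¬ (false = true) from by simp)]
      exact ih (by omega) (fun k hk1 hk2 => hfalse k hk1 (by omega))

-- A's inner descending scan computes the maximum matching j (strict improvement only)
lemma pvDescFold (cond : Int → Bool) (v : Option String × Option Int) :
    ∀ (n : Nat) (st : Int × Option String × Option Int), 0 ≤ st.1 →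
    (PySem.List.pyRange (10 + (n : Int)) 10 (-1)).foldl
        (fun st j => if cond j then (if j > st.1 then (j, v) else st) else st) st
      = if pvMx cond n > st.1 then (pvMx cond n, v) else st := by
  intro n
  induction n with
  | zero =>
    intro st hst
    rw [PySem.List.pyRange_neg_one_eq_nil (by norm_num), List.foldl_nil,
      show pvMx cond 0 = 0 from rfl, if_neg (show ¬ (0 : Int) > st.1 from by omega)]
  | succ n ih =>
    intro st hst
    have hcons : PySem.List.pyRange (10 + ((n + 1 : Nat) : Int)) 10 (-1)
        = (11 + (n : Int)) :: PySem.List.pyRange (10 + (n : Int)) 10 (-1) := by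
      have h1 : (10 + ((n + 1 : Nat) : Int)) = 11 + (n : Int) := by push_cast; omega
      have h2 : (11 + (n : Int)) - 1 = 10 + (n : Int) := by omega
      rw [h1, PySem.List.pyRange_neg_one_cons (by omega), h2]
    have hle := pvMx_le cond n
    rw [hcons, List.foldl_cons, pvMx_succ]
    by_cases hc : cond (11 + (n : Int)) = true
    · rw [if_pos hc, if_pos hc]
      by_cases hgt : 11 + (n : Int) > st.1
      · rw [if_pos hgt, ih (11 + (n : Int), v) (show (0:Int) ≤ 11 + (n : Int) from by omega)]
        rw [show ((11 + (n : Int), v) : Int × (Option String × Option Int)).1 = 11 + (n : Int) from rfl,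
          if_neg (show ¬ pvMx cond n > 11 + (n : Int) from by omega)]
      · rw [if_neg hgt, ih st hst, if_neg (show ¬ pvMx cond n > st.1 from by omega)]
    · rw [if_neg hc, if_neg hc]
      exact ih st hst

lemma pvMx_100 (cond : Int → Bool) :
    pvMx cond 90 = if cond 100 then 100 else pvMx cond 89 := by
  rw [show (90 : Nat) = 89 + 1 from rfl, pvMx_succ]
  norm_num

-- pvMx equals a given v when cond v holds and everything above v fails
lemma pvMx_eq_of (cond : Int → Bool) (n v : Nat) (h11 : 11 ≤ v) (hvn : v ≤ 10 + n)
    (hv : cond (v : Int) = true)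
    (habove : ∀ k : Nat, v < k → k ≤ 10 + n → cond (k : Int) = false) :
    pvMx cond n = (v : Int) := by
  have htr : pvMx cond n = pvMx cond (v - 10) := by
    refine pvMx_trunc cond (v - 10) n (by omega) (fun k hk1 hk2 => ?_)
    exact habove (11 + k) (by omega) (by omega)
  rw [htr, show v - 10 = (v - 11) + 1 from by omega, pvMx_succ,
    show (11 + ((v - 11 : Nat) : Int)) = (v : Int) from by push_cast; omega, if_pos hv]

-- pvMx is 0 when everything fails
lemma pvMx_eq_zero (cond : Int → Bool) (n : Nat)
    (h : ∀ k : Nat, 11 ≤ k → k ≤ 10 + n → cond (k : Int) = false) :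
    pvMx cond n = 0 := by
  rw [pvMx_trunc cond 0 n (by omega) (fun k hk1 hk2 => h (11 + k) (by omega) (by omega))]
  rfl

-- ---- borders: the quantity the prefix function computes ----

-- largest proper border length of l: the longest k < l.length with l.take k a suffix of l
def pvBrd (l : List Char) : Nat := Nat.findGreatest (fun k => l.take k <:+ l) (l.length - 1)

lemma pvBrd_le (l : List Char) : pvBrd l ≤ l.length - 1 := Nat.findGreatest_le _

lemma pvBrd_suffix (l : List Char) : l.take (pvBrd l) <:+ l :=
  Nat.findGreatest_spec (P := fun k => l.take k <:+ l) (Nat.zero_le _) (by simp)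

lemma pvBrd_is_greatest (l : List Char) (k : Nat) (hk : k ≤ l.length - 1)
    (h : l.take k <:+ l) : k ≤ pvBrd l := by
  by_contra hlt
  push_neg at hlt
  exact Nat.findGreatest_is_greatest (P := fun k => l.take k <:+ l) hlt hk h

-- border as an equation on the unique suffix of that length
lemma pvBorder_iff (l : List Char) (k : Nat) (hk : k ≤ l.length) :
    (l.take k <:+ l) ↔ l.take k = l.drop (l.length - k) := by
  rw [List.suffix_iff_eq_drop, List.length_take, Nat.min_eq_left hk]

-- borders below a border b of l are exactly the borders of l.take b
lemma pvChain (l : List Char) (a b : Nat) (hab : a ≤ b) (hbl : b ≤ l.length)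
    (hb : l.take b <:+ l) : (l.take a <:+ l) ↔ ((l.take b).take a <:+ l.take b) := by
  rw [List.take_take, Nat.min_eq_left hab]
  constructor
  · intro ha
    rw [pvBorder_iff l a (by omega)] at ha
    rw [pvBorder_iff l b hbl] at hb
    rw [List.suffix_iff_eq_drop, List.length_take, List.length_take,
      Nat.min_eq_left (by omega : a ≤ l.length), Nat.min_eq_left hbl, hb,
      List.drop_drop, show l.length - b + (b - a) = l.length - a from by omega, ← ha]
  · intro ha
    exact ha.trans hb

-- (k+1) is a border of t.take (i+1) iff k is a border of t.take i and t[i] = t[k]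
lemma pvExtend (t : List Char) (i k : Nat) (hi : i < t.length) (hk : k < i) :
    ((t.take (i + 1)).take (k + 1) <:+ t.take (i + 1))
      ↔ ((t.take i).take k <:+ t.take i
          ∧ t.getD i (Char.ofNat 0) = t.getD k (Char.ofNat 0)) := by
  have hkl : k < t.length := by omega
  have hlen1 : (t.take (i + 1)).length = i + 1 := by
    rw [List.length_take]; omega
  have hleni : (t.take i).length = i := by rw [List.length_take]; omega
  have hsucc : ∀ m : Nat, m < t.length → t.take (m + 1) = t.take m ++ [t.getD m (Char.ofNat 0)] := by
    intro m hm
    rw [List.getD_eq_getElem t _ hm, List.take_succ, List.getElem?_eq_getElem hm]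
    rfl
  rw [pvBorder_iff _ (k + 1) (by omega), List.take_take,
    Nat.min_eq_left (by omega : k + 1 ≤ i + 1), hlen1,
    show i + 1 - (k + 1) = i - k from by omega,
    hsucc i hi, hsucc k hkl,
    List.drop_append_of_le_length (by omega),
    pvBorder_iff _ k (by omega), List.take_take, Nat.min_eq_left (by omega : k ≤ i), hleni]
  constructor
  · intro h
    obtain ⟨h1, h2⟩ := List.append_inj' h (by simp)
    simp only [List.cons.injEq, and_true] at h2
    exact ⟨h1, h2.symm⟩
  · intro ⟨h1, h2⟩
    rw [h1, h2]

-- the while loop: starting from a border k of t.take i, it returns the largest border r ≤ k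
-- with a match at t[i] (or 0 when none matches)
lemma pvKmpFall_spec (t : List Char) (pi : List Nat) (i : Nat) (hi : i < t.length) (hi1 : 1 ≤ i)
    (hgood : ∀ j, j < i → pi.getD j 0 = pvBrd (t.take (j + 1)))
    (c : Char) (hc : c = t.getD i (Char.ofNat 0)) :
    ∀ fuel k, k ≤ fuel → k < i → ((t.take i).take k <:+ t.take i) →
    pvKmpFall t pi c k fuel ≤ k ∧ pvKmpFall t pi c k fuel < i
      ∧ ((t.take i).take (pvKmpFall t pi c k fuel) <:+ t.take i)
      ∧ (¬ c = t.getD (pvKmpFall t pi c k fuel) (Char.ofNat 0) → pvKmpFall t pi c k fuel = 0)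
      ∧ (∀ k', k' ≤ k → ((t.take i).take k' <:+ t.take i)
            → c = t.getD k' (Char.ofNat 0) → k' ≤ pvKmpFall t pi c k fuel) := by
  intro fuel
  induction fuel with
  | zero =>
    intro k hk hki hbord
    have hk0 : k = 0 := by omega
    subst hk0
    rw [pvKmpFall]
    refine ⟨le_rfl, by omega, hbord, fun _ => rfl, fun k' hk' _ _ => by omega⟩
  | succ fuel ih =>
    intro k hk hki hbord
    rw [pvKmpFall]
    by_cases hcnd : 0 < k ∧ ¬ c = t.getD k (Char.ofNat 0)
    · rw [if_pos hcnd]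
      -- recurse with k'' = pi[k-1] = pvBrd (t.take k)
      have hkk : pi.getD (k - 1) 0 = pvBrd (t.take k) := by
        have := hgood (k - 1) (by omega)
        rwa [show k - 1 + 1 = k from by omega] at this
      have hlenk : (t.take k).length = k := by rw [List.length_take]; omega
      have hk''lt : pvBrd (t.take k) < k := by
        have := pvBrd_le (t.take k)
        omega
      have htk : (t.take i).take k = t.take k := by
        rw [List.take_take, Nat.min_eq_left (by omega)]
      have hbk'' : (t.take i).take (pvBrd (t.take k)) <:+ t.take i := by
        have hs := pvBrd_suffix (t.take k)
        have hchain := pvChain (t.take i) (pvBrd (t.take k)) k (by omega)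
          (by rw [List.length_take]; omega) hbord
        rw [htk] at hchain
        exact hchain.mpr hs
      rw [hkk]
      obtain ⟨ha, hb, hc', hd, he⟩ := ih (pvBrd (t.take k)) (by omega) (by omega) hbk''
      refine ⟨by omega, hb, hc', hd, ?_⟩
      intro k' hk' hbord' hmatch
      rcases Nat.lt_or_ge k' k with hlt | hge
      · have hchain := pvChain (t.take i) k' k (by omega) (by rw [List.length_take]; omega) hbord
        rw [htk] at hchain
        have h5 : (t.take k).take k' <:+ t.take k := hchain.mp hbord'
        have h6 : k' ≤ pvBrd (t.take k) := pvBrd_is_greatest _ _ (by omega) h5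
        exact he k' h6 hbord' hmatch
      · have : k' = k := by omega
        subst this
        exact absurd hmatch hcnd.2
    · rw [if_neg hcnd]
      push_neg at hcnd
      refine ⟨le_rfl, hki, hbord, ?_, fun k' hk' _ _ => hk'⟩
      intro hne
      by_contra h0
      exact hne (hcnd (by omega))

-- one step of the outer loop computes the next prefix-function value
lemma pvKmpStep (t : List Char) (pi : List Nat) (i : Nat) (hi : i < t.length) (hip : pi.length = i)
    (hi1 : 1 ≤ i) (hgood : ∀ j, j < i → pi.getD j 0 = pvBrd (t.take (j + 1))) :
    pvKmpStepVal t pi = pvBrd (t.take (i + 1)) := by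
  subst hip
  rw [pvKmpStepVal]
  set c := t.getD pi.length (Char.ofNat 0) with hc
  set k0 := pi.getD (pi.length - 1) 0 with hk0def
  set k1 := pvKmpFall t pi c k0 k0 with hk1
  set i := pi.length
  have hk0 : k0 = pvBrd (t.take i) := by
    rw [hk0def]
    have := hgood (i - 1) (by omega)
    rwa [show i - 1 + 1 = i from by omega] at this
  have hleni : (t.take i).length = i := by rw [List.length_take]; omega
  have hk0lt : k0 < i := by
    rw [hk0]; have := pvBrd_le (t.take i); omega
  have hb0 : (t.take i).take k0 <:+ t.take i := by rw [hk0]; exact pvBrd_suffix _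
  obtain ⟨ha, hblt, hbord, hmm, hmax⟩ :=
    pvKmpFall_spec t pi i hi hi1 hgood c hc k0 k0 le_rfl hk0lt hb0
  rw [← hk1] at ha hblt hbord hmm hmax
  have hmax' : ∀ k', k' < i → ((t.take i).take k' <:+ t.take i)
      → c = t.getD k' (Char.ofNat 0) → k' ≤ k1 := by
    intro k' hk' hb' hm'
    have h7 : k' ≤ k0 := by
      rw [hk0]; exact pvBrd_is_greatest _ _ (by omega) hb'
    exact hmax k' h7 hb' hm'
  by_cases hmatch : c = t.getD k1 (Char.ofNat 0)
  · rw [if_pos hmatch]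
    have hb1 : (t.take (i + 1)).take (k1 + 1) <:+ t.take (i + 1) :=
      (pvExtend t i k1 hi hblt).mpr ⟨hbord, hmatch⟩
    have hlen1 : (t.take (i + 1)).length = i + 1 := by rw [List.length_take]; omega
    have hle : k1 + 1 ≤ pvBrd (t.take (i + 1)) :=
      pvBrd_is_greatest _ _ (by omega) hb1
    have hge : pvBrd (t.take (i + 1)) ≤ k1 + 1 := by
      set M := pvBrd (t.take (i + 1)) with hM
      rcases Nat.eq_zero_or_pos M with h0 | hpos
      · omega
      · obtain ⟨k', hk'⟩ : ∃ k', M = k' + 1 := ⟨M - 1, by omega⟩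
        have hMle : M ≤ i := by
          have := pvBrd_le (t.take (i + 1)); omega
        have hbM := pvBrd_suffix (t.take (i + 1))
        rw [← hM, hk'] at hbM
        obtain ⟨hb', hm'⟩ := (pvExtend t i k' hi (by omega)).mp hbM
        have := hmax' k' (by omega) hb' hm'
        omega
    omega
  · rw [if_neg hmatch]
    have h1 : k1 = 0 := hmm hmatch
    have hM : pvBrd (t.take (i + 1)) = 0 := by
      set M := pvBrd (t.take (i + 1)) with hMdef
      by_contra hne
      obtain ⟨k', hk'⟩ : ∃ k', M = k' + 1 := ⟨M - 1, by omega⟩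
      have hlen1 : (t.take (i + 1)).length = i + 1 := by rw [List.length_take]; omega
      have hMle : M ≤ i := by
        have := pvBrd_le (t.take (i + 1)); omega
      have hbM := pvBrd_suffix (t.take (i + 1))
      rw [← hMdef, hk'] at hbM
      obtain ⟨hb', hm'⟩ := (pvExtend t i k' hi (by omega)).mp hbM
      have h8 := hmax' k' (by omega) hb' hm'
      have h9 : k' = 0 := by omega
      rw [h9] at hm'
      rw [h1] at hmatch
      exact hmatch hm'
    omega

lemma pvKmpGo_spec (t : List Char) :
    ∀ m pi, pi.length + m = t.length → 1 ≤ pi.length →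
    (∀ j, j < pi.length → pi.getD j 0 = pvBrd (t.take (j + 1))) →
    (pvKmpGo t m pi).length = t.length
      ∧ ∀ j, j < t.length → (pvKmpGo t m pi).getD j 0 = pvBrd (t.take (j + 1)) := by
  intro m
  induction m with
  | zero =>
    intro pi hlen h1 hgood
    rw [pvKmpGo]
    exact ⟨by omega, fun j hj => hgood j (by omega)⟩
  | succ m ih =>
    intro pi hlen h1 hgood
    rw [pvKmpGo]
    have hstep := pvKmpStep t pi pi.length (by omega) rfl h1 hgood
    have hgood' : ∀ j, j < (pi ++ [pvKmpStepVal t pi]).length →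
        (pi ++ [pvKmpStepVal t pi]).getD j 0 = pvBrd (t.take (j + 1)) := by
      intro j hj
      simp only [List.length_append, List.length_cons, List.length_nil] at hj
      rcases Nat.lt_or_ge j pi.length with hlt | hge
      · rw [show (pi ++ [pvKmpStepVal t pi]).getD j 0 = pi.getD j 0 from by
          simp [List.getD_eq_getElem?_getD, List.getElem?_append_left hlt]]
        exact hgood j hlt
      · have hj' : j = pi.length := by omega
        subst hj'
        rw [show (pi ++ [pvKmpStepVal t pi]).getD pi.length 0 = pvKmpStepVal t pi from by
          simp [List.getD_eq_getElem?_getD]]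
        exact hstep
    exact ih _ (by simp; omega) (by simp) hgood'

-- the last prefix-function entry is the longest proper border of t
lemma pvPrefixFun_last (t : List Char) (ht : t ≠ []) :
    (pvPrefixFun t).getLast?.getD 0 = pvBrd t := by
  have htl : 1 ≤ t.length := List.length_pos_iff.mpr ht
  rw [pvPrefixFun, if_neg (by omega)]
  have hbase : ∀ j, j < ([0] : List Nat).length → ([0] : List Nat).getD j 0 = pvBrd (t.take (j + 1)) := by
    intro j hj
    simp only [List.length_cons, List.length_nil] at hj
    have : j = 0 := by omega
    subst this
    have : pvBrd (t.take 1) = 0 := by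
      have h := pvBrd_le (t.take 1)
      rw [List.length_take, Nat.min_eq_left htl] at h
      omega
    simpa [List.getD] using this.symm
  obtain ⟨hl, hg⟩ := pvKmpGo_spec t (t.length - 1) [0] (by simp; omega) (by simp) hbase
  have hlast := hg (t.length - 1) (by omega)
  rw [show t.length - 1 + 1 = t.length from by omega, List.take_length] at hlast
  rw [List.getLast?_eq_getElem?, ← List.getD_eq_getElem?_getD, hl, hlast]

-- ---- the bridge: pvOverlapKMP equals A's maximal matching length ----

-- characterization of borders of p ++ 0 :: S when 0 occurs in neither p nor S
lemma pvBorderChar (p Sl : List Char) (hp : (Char.ofNat 0) ∉ p) (hS : (Char.ofNat 0) ∉ Sl)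
    (j : Nat) (hj : j ≤ (p ++ (Char.ofNat 0) :: Sl).length - 1) :
    ((p ++ (Char.ofNat 0) :: Sl).take j <:+ (p ++ (Char.ofNat 0) :: Sl))
      ↔ (j ≤ p.length ∧ j ≤ Sl.length ∧ p.take j <:+ Sl) := by
  set t := p ++ (Char.ofNat 0) :: Sl with htdef
  have htlen : t.length = p.length + 1 + Sl.length := by
    simp [htdef]; omega
  have hsent : ∀ m, m < t.length → (t.getD m (Char.ofNat 0) = Char.ofNat 0 ↔ m = p.length) := by
    intro m hm
    constructor
    · intro h0
      by_contra hne
      rcases Nat.lt_or_ge m p.length with hlt | hge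
      · have : t.getD m (Char.ofNat 0) ∈ p := by
          rw [List.getD_eq_getElem t _ hm]
          have : t[m] = p[m]'(hlt) := by
            simp [htdef, List.getElem_append_left hlt]
          rw [this]; exact List.getElem_mem _
        rw [h0] at this; exact hp this
      · have hgt : p.length < m := by omega
        have hmS : m - p.length - 1 < Sl.length := by omega
        have : t.getD m (Char.ofNat 0) ∈ Sl := by
          rw [List.getD_eq_getElem t _ hm]
          have : t[m] = ((Char.ofNat 0) :: Sl)[m - p.length]'(by simp; omega) := by
            simp [htdef, List.getElem_append_right (by omega : p.length ≤ m)]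
          rw [this]
          have h2 : ((Char.ofNat 0) :: Sl)[m - p.length]'(by simp; omega) = Sl[m - p.length - 1]'(hmS) := by
            rcases Nat.exists_eq_add_of_lt hgt with ⟨k, hk⟩
            have hmp : m - p.length = k + 1 := by omega
            simp only [hmp, List.getElem_cons_succ, Nat.add_sub_cancel]
          rw [h2]; exact List.getElem_mem _
        rw [h0] at this; exact hS this
    · intro hm'
      subst hm'
      rw [List.getD_eq_getElem t _ hm]
      simp [htdef]
  constructor
  · intro hsuf
    have heq := (pvBorder_iff t j (by omega)).mp hsuf
    -- first: j ≤ Sl.length, else the drop side contains the sentinel strictly inside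
    have hjS : j ≤ Sl.length := by
      by_contra hgt
      push_neg at hgt
      -- position of sentinel inside the dropped suffix
      have hidx : t.length - j + (j - Sl.length - 1) = p.length := by omega
      have hjlt : j - Sl.length - 1 < j := by omega
      have h1 : (t.take j)[j - Sl.length - 1]'(by rw [List.length_take]; omega)
          = (t.drop (t.length - j))[j - Sl.length - 1]'(by rw [List.length_drop]; omega) := by
        simp only [heq]
      rw [List.getElem_take, List.getElem_drop] at h1
      have hsl : t[t.length - j + (j - Sl.length - 1)]'(by omega) = Char.ofNat 0 := by
        have := (hsent p.length (by omega)).mpr rfl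
        rw [List.getD_eq_getElem t _ (by omega)] at this
        simpa [hidx] using this
      have hne : ¬ t[j - Sl.length - 1]'(by omega) = Char.ofNat 0 := by
        intro hc
        have := (hsent (j - Sl.length - 1) (by omega)).mp
          (by rw [List.getD_eq_getElem t _ (by omega)]; exact hc)
        omega
      rw [h1, hsl] at hne
      exact hne rfl
    -- second: j ≤ p.length, else the take side contains the sentinel, drop side does not
    have hjp : j ≤ p.length := by
      by_contra hgt
      push_neg at hgt
      have h1 : (t.take j)[p.length]'(by rw [List.length_take]; omega)
          = (t.drop (t.length - j))[p.length]'(by rw [List.length_drop]; omega) := by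
        simp only [heq]
      rw [List.getElem_take, List.getElem_drop] at h1
      have hsl : t[p.length]'(by omega) = Char.ofNat 0 := by
        have := (hsent p.length (by omega)).mpr rfl
        rw [List.getD_eq_getElem t _ (by omega)] at this
        exact this
      have hne : ¬ t[t.length - j + p.length]'(by omega) = Char.ofNat 0 := by
        intro hc
        have := (hsent (t.length - j + p.length) (by omega)).mp
          (by rw [List.getD_eq_getElem t _ (by omega)]; exact hc)
        omega
      rw [hsl] at h1
      exact hne h1.symm
    refine ⟨hjp, hjS, ?_⟩
    -- now both sides live in p and Sl
    have hT : t.take j = p.take j := by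
      rw [htdef, List.take_append_of_le_length hjp]
    have hD : t.drop (t.length - j) = Sl.drop (Sl.length - j) := by
      rw [htdef, List.drop_append, List.drop_eq_nil_of_le (by omega : p.length ≤ t.length - j),
        show t.length - j - p.length = (Sl.length - j) + 1 from by omega,
        List.drop_succ_cons, List.nil_append]
    rw [List.suffix_iff_eq_drop, List.length_take, Nat.min_eq_left hjp, ← hD, ← hT, heq]
  · intro ⟨hjp, hjS, hsuf⟩
    rw [pvBorder_iff t j (by omega)]
    have hT : t.take j = p.take j := by
      rw [htdef, List.take_append_of_le_length hjp]
    have hD : t.drop (t.length - j) = Sl.drop (Sl.length - j) := by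
      rw [htdef, List.drop_append, List.drop_eq_nil_of_le (by omega : p.length ≤ t.length - j),
        show t.length - j - p.length = (Sl.length - j) + 1 from by omega,
        List.drop_succ_cons, List.nil_append]
    rw [hT, hD]
    rw [List.suffix_iff_eq_drop, List.length_take, Nat.min_eq_left hjp] at hsuf
    exact hsuf

-- per fragment: B's KMP overlap equals the maximum of A's endswith conditions over [11,100]
lemma pvOverlap_eq (S frag : String)
    (hS : (Char.ofNat 0) ∉ S.toList) (hf : (Char.ofNat 0) ∉ frag.toList) :
    pvOverlapKMP S frag
      = pvMx (fun j => PySem.Str.endswith S (PySem.Str.slice frag none (some j))) 90 := by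
  have hsliceJ : ∀ j : Int, 0 ≤ j →
      (PySem.Str.slice frag none (some j)).toList = frag.toList.take j.toNat := by
    intro j hj
    rw [PySem.Str.toList_slice, PySem.Chars.slice_eq_listSlice, PySem.List.slice_to _ hj]
  simp only [pvOverlapKMP]
  set Sl := S.toList with hSldef
  have hsl' : (PySem.Str.slice S (some (-100)) none).toList = Sl.drop (Sl.length - 100) := by
    rw [PySem.Str.toList_slice, PySem.Chars.slice_eq_listSlice,
      PySem.List.slice_from_neg_ofNat _ 100 (by norm_num)]
  rw [hsl']
  set Sl' := Sl.drop (Sl.length - 100) with hSl'def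
  have hS' : (Char.ofNat 0) ∉ Sl' := fun h => hS (List.mem_of_mem_drop h)
  -- a string of length ≤ 100 is a suffix of Sl iff it is a suffix of its last-100 tail
  have htail : ∀ u : List Char, u.length ≤ 100 → ((u <:+ Sl) ↔ (u <:+ Sl')) := by
    intro u hu
    constructor
    · intro h
      have hlen := h.length_le
      rw [List.suffix_iff_eq_drop] at h
      rw [List.suffix_iff_eq_drop, hSl'def, List.length_drop, List.drop_drop,
        show Sl.length - 100 + (Sl.length - (Sl.length - 100) - u.length)
          = Sl.length - u.length from by omega]
      exact h
    · intro h
      exact h.trans (List.drop_suffix _ _)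
  set p : List Char := (PySem.Str.slice frag none (some 100)).toList with hpdef
  have hpl : p = frag.toList.take 100 := by
    rw [hpdef, hsliceJ 100 (by norm_num)]
    rfl
  have hcond : ∀ jn : Nat,
      ((PySem.Str.endswith S (PySem.Str.slice frag none (some (jn : Int)))) = true)
        ↔ (frag.toList.take jn <:+ Sl) := by
    intro jn
    rw [PySem.Str.endswith_eq, hsliceJ _ (by positivity), PySem.Chars.endswith_iff,
      Int.toNat_natCast]
  have htne : (p ++ (Char.ofNat 0) :: Sl') ≠ [] := by simp
  have htlen : (p ++ (Char.ofNat 0) :: Sl').length = p.length + 1 + Sl'.length := by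
    rw [List.length_append, List.length_cons]
    omega
  set M := pvBrd (p ++ (Char.ofNat 0) :: Sl') with hMdef
  have hp0 : (Char.ofNat 0) ∉ p := by
    rw [hpl]; exact fun h => hf (List.mem_of_mem_take h)
  have hple : p.length ≤ 100 := by
    rw [hpl]; exact List.length_take_le _ _
  have hM1 : M ≤ (p ++ (Char.ofNat 0) :: Sl').length - 1 := pvBrd_le _
  obtain ⟨hMp, hMS, hMsuf⟩ :=
    (pvBorderChar p Sl' hp0 hS' M hM1).mp (pvBrd_suffix _)
  have htakeJ : ∀ jn : Nat, jn ≤ 100 → frag.toList.take jn = p.take jn := by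
    intro jn h
    rw [hpl, List.take_take, Nat.min_eq_left h]
  have htakelen : ∀ jn : Nat, (p.take jn).length ≤ 100 := by
    intro jn
    have := List.length_take_le jn p
    have := List.length_take_le' jn p
    omega
  rw [pvPrefixFun_last _ htne, ← hMdef]
  by_cases hM : M = p.length
  · -- the whole pattern is a suffix of S: both sides give 100
    have hps : p <:+ Sl' := by
      have h := hMsuf
      rw [hM, List.take_length] at h
      exact h
    have h100 : PySem.Str.endswith S (PySem.Str.slice frag none (some 100)) = true := by
      have h := (hcond 100).mpr (by
        rw [htakeJ 100 le_rfl, List.take_of_length_le hple]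
        exact (htail p hple).mpr hps)
      simpa using h
    rw [if_pos hM, pvMx_100, if_pos h100]
  · have hMlt : M < p.length := by omega
    have hnps : ¬ (p <:+ Sl') := by
      intro hsuf
      have hlen : p.length ≤ Sl'.length := hsuf.length_le
      have hb := (pvBorderChar p Sl' hp0 hS' p.length (by omega)).mpr
        ⟨le_rfl, hlen, by rw [List.take_length]; exact hsuf⟩
      have := pvBrd_is_greatest _ p.length (by omega) hb
      omega
    have habove : ∀ k : Nat, M < k → k ≤ 100 →
        (PySem.Str.endswith S (PySem.Str.slice frag none (some (k : Int))) = false) := by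
      intro k hk1 hk2
      rw [Bool.eq_false_iff]
      intro htrue
      have hks : frag.toList.take k <:+ Sl := (hcond k).mp htrue
      rw [htakeJ k hk2] at hks
      have hks' : p.take k <:+ Sl' := (htail _ (htakelen k)).mp hks
      rcases Nat.lt_or_ge k p.length with hlt | hge
      · have hklen : k ≤ Sl'.length := by
          have h := hks'.length_le
          rwa [List.length_take, Nat.min_eq_left (by omega)] at h
        have hb := (pvBorderChar p Sl' hp0 hS' k (by omega)).mpr ⟨by omega, hklen, hks'⟩
        have := pvBrd_is_greatest _ k (by omega) hb
        omega
      · rw [List.take_of_length_le hge] at hks'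
        exact hnps hks'
    rw [if_neg hM]
    by_cases h11 : 11 ≤ M
    · rw [if_pos (by omega : M > 10)]
      refine (pvMx_eq_of _ 90 M h11 (by omega) ?_ ?_).symm
      · refine (hcond M).mpr ?_
        rw [htakeJ M (by omega)]
        exact (htail _ (htakelen M)).mpr hMsuf
      · exact fun k a b => habove k a (by omega)
    · rw [if_neg (by omega)]
      exact (pvMx_eq_zero _ 90 (fun k hk1 hk2 => habove k (by omega) (by omega))).symm

-- outer loops agree (B keeps the triple in output order)
lemma pvOuter (S : String) (used : List Int) (hS : (Char.ofNat 0) ∉ S.toList) :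
    ∀ (l : List String), (∀ x ∈ l, (Char.ofNat 0) ∉ x.toList) →
    ∀ (k : Int) (bo : Int) (bf : Option String) (bi : Option Int), 0 ≤ bo →
    ((PySem.List.enumerate l k).foldl
      (fun (st : Int × Option String × Option Int) p =>
        if p.1 ∈ used then st
        else
          (PySem.List.pyRange 100 10 (-1)).foldl
            (fun (st : Int × Option String × Option Int) j =>
              if PySem.Str.endswith S (PySem.Str.slice p.2 none (some j)) then
                if j > st.1 then (j, some p.2, some p.1) else st
              else st)
            st)
      (bo, bf, bi))
    = (fun (r : Option String × Option Int × Int) => (r.2.2, r.1, r.2.1))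
        ((PySem.List.enumerate l k).foldl
          (fun (st : Option String × Option Int × Int) p =>
            if p.1 ∈ PySem.Set.ofList used then st
            else
              if pvOverlapKMP S p.2 > st.2.2 then (some p.2, some p.1, pvOverlapKMP S p.2) else st)
          (bf, bi, bo)) := by
  intro l
  induction l with
  | nil => intro _ k bo bf bi _; simp [PySem.List.enumerate_nil]
  | cons x l ih =>
    intro hsf k bo bf bi hbo
    have hx : (Char.ofNat 0) ∉ x.toList := hsf x (by simp)
    have hrest : ∀ y ∈ l, (Char.ofNat 0) ∉ y.toList := fun y hy => hsf y (by simp [hy])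
    rw [PySem.List.enumerate_cons]
    simp only [List.foldl_cons]
    by_cases hk : k ∈ used
    · rw [if_pos hk, if_pos ((PySem.Set.mem_ofList used k).mpr hk)]
      exact ih hrest (k + 1) bo bf bi hbo
    · rw [if_neg hk, if_neg (fun hmem => hk ((PySem.Set.mem_ofList used k).mp hmem))]
      have hstep := pvDescFold (fun j => PySem.Str.endswith S (PySem.Str.slice x none (some j)))
        (some x, some k) 90 (bo, bf, bi) hbo
      rw [show (100 : Int) = 10 + ((90 : Nat) : Int) from by norm_num, hstep,
        show ((bo, bf, bi) : Int × Option String × Option Int).1 = bo from rfl,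
        ← pvOverlap_eq S x hS hx]
      have hnn : 0 ≤ pvOverlapKMP S x := by
        rw [pvOverlap_eq S x hS hx]; exact pvMx_nonneg _ _
      by_cases hgt : pvOverlapKMP S x > bo
      · rw [if_pos hgt,
          if_pos (show pvOverlapKMP S x > ((bf, bi, bo) : Option String × Option Int × Int).2.2 from hgt)]
        exact ih hrest (k + 1) _ _ _ hnn
      · rw [if_neg hgt,
          if_neg (show ¬ pvOverlapKMP S x > ((bf, bi, bo) : Option String × Option Int × Int).2.2 from hgt)]
        exact ih hrest (k + 1) bo bf bi hbo

-- Dom implies the strings are sentinel-free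
lemma pvNoSentinel (s : String) (h : pvDomStr s = true) : (Char.ofNat 0) ∉ s.toList := by
  intro hmem
  have := (List.all_eq_true.mp h) _ hmem
  simp [pvDomChar, Char.toNat] at this

-- ===== VERDICT (by name: the statement is the Claim_ definition above) =====
theorem find_best_overlap_spec : Claim_equal_find_best_overlap := by
  intro S frags used hdom
  unfold Dom_find_best_overlap at hdom
  simp only [Bool.and_eq_true, List.all_eq_true] at hdom
  have hS : (Char.ofNat 0) ∉ S.toList := pvNoSentinel S hdom.1.1
  have hfr : ∀ x ∈ frags, (Char.ofNat 0) ∉ x.toList := fun x hx =>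
    pvNoSentinel x (hdom.1.2 x hx)
  unfold Spec_find_best_overlap find_best_overlap find_best_overlap_alt
  rw [pvOuter S used hS frags hfr 0 0 none none le_rfl]
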